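-- pv_equiv track=rewrite | github.com/linroger/FinanceCompendium | scripts/cleanup_bullet_lists.py | cleanup_bullet_lists
-- ===== SOURCE A (Python) =====
-- def cleanup_bullet_lists(text):
--     """Remove unnecessary empty lines from bullet lists.
--
--     Args:
--         text (str): The input text to process.
--
--     Returns:
--         str: The cleaned up text.
--     """
--     lines = text.splitlines(True)
--     result = []
--     i = 0
--
--     while i < len(lines):
--         line = lines[i]
--
--         # Check if this is a bullet point (starts with hyphen, ignoring whitespace)
--         stripped_line = line.lstrip()
--         is_bullet = stripped_line.startswith('-') and len(stripped_line) > 1 and stripped_line[1].isspace()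
--
--         if is_bullet:
--             # Remove empty lines above bullet points
--             while (result and
--                    (result[-1].strip() == '' or result[-1].isspace()) and
--                    len(result) > 0):
--                 result.pop()
--
--             result.append(line)
--
--             # Check if next non-empty line is also a bullet
--             j = i + 1
--             while j < len(lines) and lines[j].strip() == '':
--                 j += 1
--
--             if j < len(lines):
--                 next_stripped = lines[j].lstrip()
--                 next_is_bullet = (next_stripped.startswith('-') and
--                                 len(next_stripped) > 1 and
--                                 next_stripped[1].isspace())
--
--                 if next_is_bullet:
--                     # Skip empty lines between bullets
--                     i = j - 1
--         else:
--             result.append(line)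
--
--         i += 1
--
--     return ''.join(result)
-- ===== SOURCE B (Python) =====
-- def cleanup_bullet_lists(text):
--     """Remove unnecessary empty lines from bullet lists.
--
--     Single reverse pass: a blank line is dropped exactly when the nearest
--     following non-blank line is a bullet item.
--     """
--     lines = text.splitlines(True)
--     out = []
--     leads_to_bullet = False  # nearest following non-blank line is a bullet
--     for line in reversed(lines):
--         stripped = line.lstrip()
--         if stripped.startswith('-') and len(stripped) > 1 and stripped[1].isspace():
--             out.append(line)
--             leads_to_bullet = True
--         elif line.strip() == '':
--             if not leads_to_bullet:
--                 out.append(line)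
--         else:
--             out.append(line)
--             leads_to_bullet = False
--     return ''.join(reversed(out))
-- ===== Notes on version B (the rewrite author's own statement) =====
-- stated objective: simpler
-- what changed: A's forward index loop with a result.pop() look-behind over already-emitted lines plus a separate forward look-ahead scan over blanks is replaced by a single reverse pass carrying one boolean flag recording whether the nearest following non-blank line is a bullet; blank lines are dropped exactly when the flag is set.
import Mathlib
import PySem

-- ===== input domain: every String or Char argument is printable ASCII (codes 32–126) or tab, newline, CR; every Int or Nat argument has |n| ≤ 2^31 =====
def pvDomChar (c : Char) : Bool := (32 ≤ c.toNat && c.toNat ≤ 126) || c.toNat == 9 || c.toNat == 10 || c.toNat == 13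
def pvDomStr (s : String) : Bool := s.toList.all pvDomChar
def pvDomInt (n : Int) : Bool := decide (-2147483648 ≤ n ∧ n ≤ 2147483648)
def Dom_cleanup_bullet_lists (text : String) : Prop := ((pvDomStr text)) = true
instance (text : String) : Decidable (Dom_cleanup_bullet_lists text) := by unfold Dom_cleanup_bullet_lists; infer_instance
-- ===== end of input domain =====

-- B replaces A's forward index loop with result.pop() lookbehind and a lookahead scan
-- by one reverse pass carrying a single boolean flag (objective: simpler).

-- shared helper: text.splitlines(True) (keepends). Exact on the Dom alphabet, where the
-- only line-break characters are '\n', '\r' and '\r\n' (Python's further break characters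
-- \v, \f, \x1c-\x1e, … lie outside Dom).
def pvSplitKeep : List Char → List Char → List (List Char)
  | [], cur => if cur.isEmpty then [] else [cur.reverse]
  | c :: rest, cur =>
    if c = '\n' then (cur.reverse ++ ['\n']) :: pvSplitKeep rest []
    else if c = '\r' then
      if rest.head? = some '\n' then (cur.reverse ++ ['\r', '\n']) :: pvSplitKeep rest.tail []
      else (cur.reverse ++ ['\r']) :: pvSplitKeep rest []
    else pvSplitKeep rest (c :: cur)
  termination_by cs _ => cs.length
  decreasing_by all_goals (simp [List.length_tail]; try omega)

-- shared helper: the bullet test both Pythons perform verbatim: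
-- stripped = line.lstrip(); stripped.startswith('-') and len(stripped) > 1 and stripped[1].isspace()
def pvIsBullet (line : List Char) : Bool :=
  let stripped := PySem.Chars.lstrip line
  PySem.Chars.startswith stripped ['-'] && decide (1 < stripped.length) &&
    (match PySem.List.pyGet? stripped 1 with
     | some c => PySem.Chars.isspace c
     | none => false)

-- shared helper: the blank-line test line.strip() == ''
def pvIsBlank (l : List Char) : Bool := PySem.Chars.strip l == []

-- ===== PORT A =====
-- A's pop condition: result[-1].strip() == '' or result[-1].isspace()
def pvPopBlankA (l : List Char) : Bool :=
  pvIsBlank l || PySem.Chars.strIsspace l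

-- A's inner 'while result and (…): result.pop()'
def pvPopBlanksA (r : List (List Char)) : List (List Char) :=
  match h : r.getLast? with
  | some last => if pvPopBlankA last then pvPopBlanksA r.dropLast else r
  | none => r
  termination_by r.length
  decreasing_by
    have hne : r ≠ [] := by intro hn; subst hn; simp at h
    have hl : 0 < r.length := List.length_pos_iff.mpr hne
    simp [List.length_dropLast]; omega

-- A's 'while i < len(lines)' loop; 'i = j - 1; i += 1' = continue at lines[j],
-- rendered as continuing on the dropWhile-suffix (the inner 'while j' scan).
def pvLoopA : List (List Char) → List (List Char) → List (List Char)
  | [], result => result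
  | line :: rs, result =>
    if pvIsBullet line then
      match rs.dropWhile pvIsBlank with
      | next :: _ =>
        if pvIsBullet next then pvLoopA (rs.dropWhile pvIsBlank) (pvPopBlanksA result ++ [line])
        else pvLoopA rs (pvPopBlanksA result ++ [line])
      | [] => pvLoopA rs (pvPopBlanksA result ++ [line])
    else pvLoopA rs (result ++ [line])
  termination_by rest _ => rest.length
  decreasing_by
    all_goals have := List.length_dropWhile_le pvIsBlank rs
    all_goals simp_all
    all_goals try omega

def cleanup_bullet_lists (text : String) : String :=
  String.ofList (PySem.Chars.join [] (pvLoopA (pvSplitKeep text.toList []) []))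

-- ===== PORT B =====
-- B's loop body: one step of the reverse pass, state (leads_to_bullet, out)
def pvStepB (st : Bool × List (List Char)) (line : List Char) : Bool × List (List Char) :=
  if pvIsBullet line then (true, st.2 ++ [line])
  else if pvIsBlank line then
    (if st.1 then st else (st.1, st.2 ++ [line]))
  else (false, st.2 ++ [line])

def cleanup_bullet_lists_alt (text : String) : String :=
  String.ofList (PySem.Chars.join []
    (((pvSplitKeep text.toList []).reverse.foldl pvStepB (false, [])).2.reverse))

-- ===== PRECONDITION & SPEC =====
def Spec_cleanup_bullet_lists (text : String) (out : String) : Prop := out = cleanup_bullet_lists_alt text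
instance (text : String) (out : String) : Decidable (Spec_cleanup_bullet_lists text out) := by unfold Spec_cleanup_bullet_lists; infer_instance

-- ===== CLAIM (what is proved, stated in full; the proofs are below) =====
def Claim_equal_cleanup_bullet_lists : Prop := ∀ (text : String), Dom_cleanup_bullet_lists text → Spec_cleanup_bullet_lists text (cleanup_bullet_lists text)

-- ===== LEMMAS AND PROOFS =====

-- "the nearest following non-blank line is a bullet"
def pvFnb : List (List Char) → Bool
  | [] => false
  | l :: rs => if pvIsBlank l then pvFnb rs else pvIsBullet l

-- the common spec: keep every line except a blank whose nearest following non-blank line is a bullet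
def pvClean : List (List Char) → List (List Char)
  | [] => []
  | l :: rs => if pvIsBlank l && pvFnb rs then pvClean rs else l :: pvClean rs

theorem pvIsBullet_not_blank {l : List Char} (h : pvIsBullet l = true) : pvIsBlank l = false := by
  unfold pvIsBullet at h
  unfold pvIsBlank PySem.Chars.strip PySem.Chars.rstrip PySem.Chars.lstrip at *
  simp only [Bool.and_eq_true, decide_eq_true_eq] at h
  obtain ⟨⟨hpre, _⟩, _⟩ := h
  rw [PySem.Chars.startswith] at hpre
  simp only [beq_eq_false_iff_ne]
  intro hnil
  rw [List.reverse_eq_nil_iff, List.dropWhile_eq_nil_iff] at hnil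
  have hmem : '-' ∈ (List.dropWhile PySem.Chars.isspace l).reverse := by
    obtain ⟨t, ht⟩ := List.isPrefixOf_iff_prefix.mp hpre
    simp [← ht]
  have := hnil _ hmem
  simp [PySem.Chars.isspace] at this

theorem pvPopBlankA_eq (l : List Char) : pvPopBlankA l = pvIsBlank l := by
  unfold pvPopBlankA
  cases hs : pvIsBlank l with
  | true => simp
  | false =>
    simp only [Bool.false_or]
    cases hi : PySem.Chars.strIsspace l with
    | false => rfl
    | true =>
      exfalso
      unfold PySem.Chars.strIsspace at hi
      simp only [Bool.and_eq_true, List.all_eq_true] at hi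
      have hstrip : PySem.Chars.strip l = [] := by
        unfold PySem.Chars.strip PySem.Chars.lstrip PySem.Chars.rstrip
        have : List.dropWhile PySem.Chars.isspace l = [] :=
          List.dropWhile_eq_nil_iff.mpr (fun x hx => hi.2 x hx)
        simp [this]
      simp [pvIsBlank, hstrip] at hs

theorem pvPopBlanksA_append_blank (r : List (List Char)) (l : List Char) (h : pvIsBlank l = true) :
    pvPopBlanksA (r ++ [l]) = pvPopBlanksA r := by
  rw [pvPopBlanksA.eq_def]
  split
  · rename_i last heq
    rw [List.getLast?_concat] at heq
    simp only [Option.some.injEq] at heq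
    subst heq
    simp [pvPopBlankA_eq, h, List.dropLast_concat]
  · rename_i heq
    rw [List.getLast?_concat] at heq
    simp at heq

theorem pvPopBlanksA_append_nonblank (r : List (List Char)) (l : List Char) (h : pvIsBlank l = false) :
    pvPopBlanksA (r ++ [l]) = r ++ [l] := by
  rw [pvPopBlanksA.eq_def]
  split
  · rename_i last heq
    rw [List.getLast?_concat] at heq
    simp only [Option.some.injEq] at heq
    subst heq
    simp [pvPopBlankA_eq, h]
  · rfl

theorem pvFnb_dropWhile (rs : List (List Char)) :
    pvFnb rs = (match rs.dropWhile pvIsBlank with | [] => false | next :: _ => pvIsBullet next) := by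
  induction rs with
  | nil => simp [pvFnb]
  | cons l t ih =>
    rw [pvFnb]
    cases h : pvIsBlank l with
    | true => simpa [List.dropWhile_cons, h] using ih
    | false => simp [List.dropWhile_cons, h]

theorem pvClean_dropWhile (rs : List (List Char)) (h : pvFnb rs = true) :
    pvClean (rs.dropWhile pvIsBlank) = pvClean rs := by
  induction rs with
  | nil => rfl
  | cons l t ih =>
    cases hb : pvIsBlank l with
    | false => simp [List.dropWhile_cons, hb]
    | true =>
      rw [pvFnb, hb] at h
      simp only [if_true] at h
      rw [List.dropWhile_cons]
      simp only [hb, if_true, ih h]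
      rw [pvClean, hb, h]
      simp

-- A's loop computes result (after conditional pops) ++ the common spec
theorem pvLoopA_spec (rest : List (List Char)) (result : List (List Char)) :
    pvLoopA rest result =
      (if pvFnb rest then pvPopBlanksA result else result) ++ pvClean rest := by
  induction rest, result using pvLoopA.induct with
  | case1 result => simp [pvLoopA, pvFnb, pvClean]
  | case2 line rs result hb next t hdw hnext ih =>
    -- bullet head, next non-blank (after blanks) is a bullet: continue there
    have hblank := pvIsBullet_not_blank hb
    have hfnb_rest : pvFnb (line :: rs) = true := by rw [pvFnb]; simp [hblank, hb]
    have hfnb_rs : pvFnb rs = true := by rw [pvFnb_dropWhile]; simp [hdw, hnext]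
    rw [pvLoopA]
    simp only [hb, if_true, hdw, hnext]
    rw [hdw] at ih
    rw [ih]
    have hf' : pvFnb (next :: t) = true := by
      rw [pvFnb]; simp [pvIsBullet_not_blank hnext, hnext]
    rw [hf', if_pos rfl, pvPopBlanksA_append_nonblank _ _ hblank]
    have hdrop : pvClean (next :: t) = pvClean rs := by
      rw [← hdw]; exact pvClean_dropWhile rs hfnb_rs
    rw [hdrop, hfnb_rest, if_pos rfl]
    rw [pvClean, hblank]
    simp
  | case3 line rs result hb next t hdw hnext ih =>
    -- bullet head, next non-blank exists but is not a bullet: continue at rs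
    have hblank := pvIsBullet_not_blank hb
    have hfnb_rest : pvFnb (line :: rs) = true := by rw [pvFnb]; simp [hblank, hb]
    have hfnb_rs : pvFnb rs = false := by rw [pvFnb_dropWhile]; simp [hdw, hnext]
    rw [pvLoopA]
    simp only [hb, if_true, hdw, hnext, Bool.false_eq_true, if_false]
    rw [ih, hfnb_rs]
    simp only [Bool.false_eq_true, if_false]
    rw [hfnb_rest, if_pos rfl, pvClean, hblank]
    simp
  | case4 line rs result hb hdw ih =>
    -- bullet head, everything after is blank
    have hblank := pvIsBullet_not_blank hb
    have hfnb_rest : pvFnb (line :: rs) = true := by rw [pvFnb]; simp [hblank, hb]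
    have hfnb_rs : pvFnb rs = false := by rw [pvFnb_dropWhile]; simp [hdw]
    rw [pvLoopA]
    simp only [hb, if_true, hdw]
    rw [ih, hfnb_rs]
    simp only [Bool.false_eq_true, if_false]
    rw [hfnb_rest, if_pos rfl, pvClean, hblank]
    simp
  | case5 line rs result hb ih =>
    -- non-bullet head
    rw [pvLoopA]
    simp only [hb, Bool.false_eq_true, if_false]
    rw [ih]
    cases hbl : pvIsBlank line with
    | true =>
      have hfnb_rest : pvFnb (line :: rs) = pvFnb rs := by rw [pvFnb]; simp [hbl]
      cases hf : pvFnb rs with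
      | true =>
        rw [hfnb_rest, hf, if_pos rfl, if_pos rfl]
        rw [pvPopBlanksA_append_blank _ _ hbl]
        rw [pvClean, hbl, hf]
        simp
      | false =>
        rw [hfnb_rest, hf]
        simp only [Bool.false_eq_true, if_false]
        rw [pvClean, hbl, hf]
        simp
    | false =>
      have hfnb_rest : pvFnb (line :: rs) = false := by
        rw [pvFnb]
        simp only [hbl, Bool.false_eq_true, if_false]
        simpa using hb
      cases hf : pvFnb rs with
      | true =>
        rw [hfnb_rest, pvPopBlanksA_append_nonblank _ _ hbl, pvClean, hbl]
        simp [hf]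
      | false =>
        rw [hfnb_rest, pvClean, hbl]
        simp [hf]

-- B's reverse fold computes (pvFnb, reversed common spec)
theorem pvFoldB_spec (lines : List (List Char)) :
    lines.reverse.foldl pvStepB (false, []) = (pvFnb lines, (pvClean lines).reverse) := by
  induction lines with
  | nil => simp [pvFnb, pvClean]
  | cons l rs ih =>
    rw [List.reverse_cons, List.foldl_append, ih]
    rw [List.foldl_cons, List.foldl_nil]
    unfold pvStepB
    cases hb : pvIsBullet l with
    | true =>
      have hbl := pvIsBullet_not_blank hb
      simp only [hb, if_true]
      rw [pvFnb, pvClean]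
      simp [hbl, hb]
    | false =>
      simp only [hb, Bool.false_eq_true, if_false]
      cases hbl : pvIsBlank l with
      | true =>
        simp only [hbl, if_true]
        rw [pvFnb, pvClean]
        cases hf : pvFnb rs with
        | true => simp [hbl, hf]
        | false => simp [hbl, hf]
      | false =>
        simp only [hbl, Bool.false_eq_true, if_false]
        rw [pvFnb, pvClean]
        simp [hbl, hb]

-- ===== VERDICT (by name: the statement is the Claim_ definition above) =====
theorem cleanup_bullet_lists_spec : Claim_equal_cleanup_bullet_lists := by
  intro text _
  unfold Spec_cleanup_bullet_lists cleanup_bullet_lists cleanup_bullet_lists_alt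
  rw [pvFoldB_spec, pvLoopA_spec]
  cases pvFnb (pvSplitKeep text.toList []) with
  | true => simp [pvPopBlanksA]
  | false => simp
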